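-- pv_equiv track=rewrite | github.com/laduygaga/python | sumCube.py | f
-- ===== SOURCE A (Python) =====
-- def f(a):    # a = _inputList
--     values = []
--     for i in range(3):
--         i = sum([a[m][n] for m in range(0, 3) for n in range(i, i + 3)]) \
--             - sum([a[m][n] for m in [1] for n in [i, i + 2]])
--         values.append(i)
--     for j in range(3):
--         j = sum([a[m][n] for m in range(1, 4) for n in range(j, j + 3)]) \
--             - sum([a[m][n] for m in [2] for n in [j, j + 2]])
--         values.append(j)
--     for k in range(3):
--         k = sum([a[m][n] for m in range(2, 5) for n in range(k, k + 3)]) \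
--             - sum([a[m][n] for m in [3] for n in [k, k + 2]])
--         values.append(k)
--     return max(values)
-- ===== SOURCE B (Python) =====
-- def f(a):
--     # Stage 1: row-wise prefix sums of the first 5 columns of the first 5 rows.
--     pre = []
--     for r in range(5):
--         row = a[r]
--         p = [0]
--         s = 0
--         for c in range(5):
--             s += row[c]
--             p.append(s)
--         pre.append(p)
--     # Stage 2: each hourglass from two prefix-sum differences plus the middle cell.
--     vals = []
--     for r in range(3):
--         for c in range(3):
--             vals.append(pre[r][c + 3] - pre[r][c] + a[r + 1][c + 1]
--                         + pre[r + 2][c + 3] - pre[r + 2][c])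
--     return max(vals)
-- ===== Notes on version B (the rewrite author's own statement) =====
-- stated objective: alternative
-- what changed: Two-stage algorithm: first builds a table of row-wise prefix sums, then computes each hourglass as two prefix-sum differences plus the middle cell, instead of A's three unrolled blocks that sum a 3x3 window cell by cell and subtract the middle-row corners.
import Mathlib
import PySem

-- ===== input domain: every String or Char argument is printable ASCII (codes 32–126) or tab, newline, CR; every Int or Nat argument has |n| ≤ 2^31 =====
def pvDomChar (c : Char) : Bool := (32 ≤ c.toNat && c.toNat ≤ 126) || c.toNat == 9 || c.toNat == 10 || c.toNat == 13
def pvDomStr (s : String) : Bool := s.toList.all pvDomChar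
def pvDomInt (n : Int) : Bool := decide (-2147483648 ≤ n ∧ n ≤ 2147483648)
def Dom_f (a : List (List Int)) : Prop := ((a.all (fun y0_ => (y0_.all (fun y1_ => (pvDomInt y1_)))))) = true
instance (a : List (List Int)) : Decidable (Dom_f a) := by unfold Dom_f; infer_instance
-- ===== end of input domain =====

-- B's change: a two-stage algorithm — a table of row-wise prefix sums built first, then each
-- hourglass computed as two prefix-sum differences plus the middle cell — instead of A's three
-- unrolled blocks summing each 3x3 window cell by cell and subtracting the middle-row corners.

-- shared accessor: a[m][n]; Pre_f keeps every used index in range, so the default is never read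
def idx (a : List (List Int)) (m n : Int) : Int :=
  PySem.List.pyGetD (PySem.List.pyGetD a m []) n 0

-- ===== PORT A =====
def f (a : List (List Int)) : Int :=
  let values : List Int := []
  let values := (PySem.List.pyRange 0 3 1).foldl (fun vs i =>
    let v := ((PySem.List.pyRange 0 3 1).flatMap (fun m =>
                (PySem.List.pyRange i (i + 3) 1).map (fun n => idx a m n))).sum
             - (([(1 : Int)]).flatMap (fun m =>
                ([i, i + 2]).map (fun n => idx a m n))).sum
    vs ++ [v]) values
  let values := (PySem.List.pyRange 0 3 1).foldl (fun vs j =>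
    let v := ((PySem.List.pyRange 1 4 1).flatMap (fun m =>
                (PySem.List.pyRange j (j + 3) 1).map (fun n => idx a m n))).sum
             - (([(2 : Int)]).flatMap (fun m =>
                ([j, j + 2]).map (fun n => idx a m n))).sum
    vs ++ [v]) values
  let values := (PySem.List.pyRange 0 3 1).foldl (fun vs k =>
    let v := ((PySem.List.pyRange 2 5 1).flatMap (fun m =>
                (PySem.List.pyRange k (k + 3) 1).map (fun n => idx a m n))).sum
             - (([(3 : Int)]).flatMap (fun m =>
                ([k, k + 2]).map (fun n => idx a m n))).sum
    vs ++ [v]) values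
  -- max(values): values always has 9 elements, so max never raises; the getD arm is dead
  (PySem.List.max? values (fun y => y)).getD 0

-- ===== PORT B =====
def f_alt (a : List (List Int)) : Int :=
  -- stage 1: row-wise prefix sums of the first 5 columns of the first 5 rows
  let pre := (PySem.List.pyRange 0 5 1).foldl (fun pre r =>
    let row := PySem.List.pyGetD a r []
    let ps := (PySem.List.pyRange 0 5 1).foldl (fun (st : List Int × Int) c =>
        let s := st.2 + PySem.List.pyGetD row c 0
        (st.1 ++ [s], s)) ([(0 : Int)], (0 : Int))
    pre ++ [ps.1]) ([] : List (List Int))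
  -- stage 2: each hourglass from two prefix-sum differences plus the middle cell
  let vals := (PySem.List.pyRange 0 3 1).foldl (fun vals r =>
    (PySem.List.pyRange 0 3 1).foldl (fun vals c =>
      vals ++ [idx pre r (c + 3) - idx pre r c + idx a (r + 1) (c + 1)
               + idx pre (r + 2) (c + 3) - idx pre (r + 2) c]) vals) []
  (PySem.List.max? vals (fun y => y)).getD 0

-- ===== PRECONDITION & SPEC =====
-- exactly the inputs where A's a[m][n] accesses (m,n ∈ 0..4) never raise IndexError
def Pre_f (a : List (List Int)) : Prop :=
  5 ≤ a.length ∧ ∀ r ∈ a.take 5, 5 ≤ r.length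
instance (a : List (List Int)) : Decidable (Pre_f a) := by unfold Pre_f; infer_instance

def pvWitness_f : List (List Int) :=
  [[1,1,1,0,0],[0,1,0,0,0],[1,1,1,0,0],[0,0,2,4,4],[0,0,0,2,0]]

def Spec_f (a : List (List Int)) (out : Int) : Prop := out = f_alt a
instance (a : List (List Int)) (out : Int) : Decidable (Spec_f a out) := by unfold Spec_f; infer_instance

-- ===== CLAIM (what is proved, stated in full; the proofs are below) =====
def Claim_equal_f : Prop := ∀ (a : List (List Int)), Dom_f a → Pre_f a → Spec_f a (f a)

-- ===== LEMMAS AND PROOFS =====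

-- ===== VERDICT (by name: the statement is the Claim_ definition above) =====
set_option maxHeartbeats 3200000 in
theorem f_spec : Claim_equal_f := by
  intro a _ hp
  unfold Spec_f
  obtain ⟨hl, hr⟩ := hp
  match a, hl with
  | r0 :: r1 :: r2 :: r3 :: r4 :: rest, _ =>
    have h0 := hr r0 (by simp)
    have h1 := hr r1 (by simp)
    have h2 := hr r2 (by simp)
    have h3 := hr r3 (by simp)
    have h4 := hr r4 (by simp)
    match r0, h0 with
    | a00 :: a01 :: a02 :: a03 :: a04 :: t0, _ =>
    match r1, h1 with
    | a10 :: a11 :: a12 :: a13 :: a14 :: t1, _ =>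
    match r2, h2 with
    | a20 :: a21 :: a22 :: a23 :: a24 :: t2, _ =>
    match r3, h3 with
    | a30 :: a31 :: a32 :: a33 :: a34 :: t3, _ =>
    match r4, h4 with
    | a40 :: a41 :: a42 :: a43 :: a44 :: t4, _ =>
      have n01 : (0:Int)+1 = 1 := by decide
      have n02 : (0:Int)+2 = 2 := by decide
      have n03 : (0:Int)+3 = 3 := by decide
      have n11 : (1:Int)+1 = 2 := by decide
      have n12 : (1:Int)+2 = 3 := by decide
      have n13 : (1:Int)+3 = 4 := by decide
      have n21 : (2:Int)+1 = 3 := by decide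
      have n22 : (2:Int)+2 = 4 := by decide
      have n23 : (2:Int)+3 = 5 := by decide
      have e1 : PySem.List.pyRange 0 3 1 = [0,1,2] := by decide
      have e2 : PySem.List.pyRange 1 4 1 = [1,2,3] := by decide
      have e3 : PySem.List.pyRange 2 5 1 = [2,3,4] := by decide
      have e5 : PySem.List.pyRange 0 5 1 = [0,1,2,3,4] := by decide
      have o0 : ∀ (R0 R1 R2 R3 R4 : List Int) (s : List (List Int)),
          PySem.List.pyGetD (R0::R1::R2::R3::R4::s) (0:Int) [] = R0 := by intros; simp [pysem]
      have o1 : ∀ (R0 R1 R2 R3 R4 : List Int) (s : List (List Int)),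
          PySem.List.pyGetD (R0::R1::R2::R3::R4::s) (1:Int) [] = R1 := by intros; simp [pysem]
      have o2 : ∀ (R0 R1 R2 R3 R4 : List Int) (s : List (List Int)),
          PySem.List.pyGetD (R0::R1::R2::R3::R4::s) (2:Int) [] = R2 := by intros; simp [pysem]
      have o3 : ∀ (R0 R1 R2 R3 R4 : List Int) (s : List (List Int)),
          PySem.List.pyGetD (R0::R1::R2::R3::R4::s) (3:Int) [] = R3 := by intros; simp [pysem]
      have o4 : ∀ (R0 R1 R2 R3 R4 : List Int) (s : List (List Int)),
          PySem.List.pyGetD (R0::R1::R2::R3::R4::s) (4:Int) [] = R4 := by intros; simp [pysem]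
      have c0 : ∀ (x0 x1 x2 x3 x4 : Int) (t : List Int),
          PySem.List.pyGetD (x0::x1::x2::x3::x4::t) (0:Int) 0 = x0 := by intros; simp [pysem]
      have c1 : ∀ (x0 x1 x2 x3 x4 : Int) (t : List Int),
          PySem.List.pyGetD (x0::x1::x2::x3::x4::t) (1:Int) 0 = x1 := by intros; simp [pysem]
      have c2 : ∀ (x0 x1 x2 x3 x4 : Int) (t : List Int),
          PySem.List.pyGetD (x0::x1::x2::x3::x4::t) (2:Int) 0 = x2 := by intros; simp [pysem]
      have c3 : ∀ (x0 x1 x2 x3 x4 : Int) (t : List Int),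
          PySem.List.pyGetD (x0::x1::x2::x3::x4::t) (3:Int) 0 = x3 := by intros; simp [pysem]
      have c4 : ∀ (x0 x1 x2 x3 x4 : Int) (t : List Int),
          PySem.List.pyGetD (x0::x1::x2::x3::x4::t) (4:Int) 0 = x4 := by intros; simp [pysem]
      have d5 : ∀ (x0 x1 x2 x3 x4 x5 : Int),
          PySem.List.pyGetD [x0,x1,x2,x3,x4,x5] (5:Int) 0 = x5 := by intros; simp [pysem]
      have congrmax : ∀ {x y u v : Int}, x = u → y = v → max x y = max u v := by
        intro x y u v hx hy; rw [hx, hy]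
      simp only [f, f_alt, idx, n01, n02, n03, n11, n12, n13, n21, n22, n23, e1, e2, e3, e5,
        o0, o1, o2, o3, o4, c0, c1, c2, c3, c4, d5,
        List.foldl_cons, List.foldl_nil, List.flatMap_cons, List.flatMap_nil,
        List.map_cons, List.map_nil, List.sum_cons, List.sum_nil,
        List.append_nil, List.nil_append, List.cons_append,
        PySem.List.max?_id_cons, Option.getD_some]
      refine congrmax (congrmax (congrmax (congrmax (congrmax (congrmax (congrmax
        (congrmax ?_ ?_) ?_) ?_) ?_) ?_) ?_) ?_) ?_ <;> omega
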